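-- pv_equiv track=rewrite | github.com/SansForSSBU/aoc-2025 | puzzle10/solution.py | unique_binary_perms
-- ===== SOURCE A (Python) =====
-- from itertools import permutations, combinations
--
-- def unique_binary_perms(ones, zeros):
--     result = []
--     n = ones + zeros
--     for ones_positions in combinations(range(n), ones):
--         arr = [0] * n
--         for i in ones_positions:
--             arr[i] = 1
--         result.append(arr)
--     return result
-- ===== SOURCE B (Python) =====
-- def unique_binary_perms(ones, zeros):
--     result = []
--     # prefix is a shared linked chain (bit, parent), newest bit first; None = empty
--     stack = [(ones, zeros, None)]
--     while stack:
--         o, z, prefix = stack.pop()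
--         if o == 0 and z == 0:
--             arr = []
--             while prefix is not None:
--                 bit, prefix = prefix
--                 arr.append(bit)
--             arr.reverse()
--             result.append(arr)
--             continue
--         if z > 0:
--             stack.append((o, z - 1, (0, prefix)))
--         if o > 0:
--             stack.append((o - 1, z, (1, prefix)))
--     return result
-- ===== Notes on version B (the rewrite author's own statement) =====
-- stated objective: alternative
-- what changed: B builds each array by prefix decisions with an explicit DFS stack on the remaining (ones, zeros) counts (1-branch explored before 0-branch), instead of choosing index sets via itertools.combinations and writing 1s into a zero-filled array.
-- outside the precondition, e.g. on unique_binary_perms(-1, 1): A raises ValueError, B returns []; on unique_binary_perms(0, -1): A returns [[]], B returns []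
import Mathlib
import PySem

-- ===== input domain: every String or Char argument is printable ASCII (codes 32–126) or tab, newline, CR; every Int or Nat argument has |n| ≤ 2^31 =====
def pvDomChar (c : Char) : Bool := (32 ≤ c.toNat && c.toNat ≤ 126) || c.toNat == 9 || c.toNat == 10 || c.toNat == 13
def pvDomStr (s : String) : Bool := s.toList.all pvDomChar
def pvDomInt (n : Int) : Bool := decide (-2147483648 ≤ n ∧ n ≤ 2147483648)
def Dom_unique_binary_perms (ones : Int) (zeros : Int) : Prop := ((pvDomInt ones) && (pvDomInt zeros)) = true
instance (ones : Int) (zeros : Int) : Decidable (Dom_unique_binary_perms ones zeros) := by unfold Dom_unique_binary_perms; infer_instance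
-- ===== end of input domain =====

-- B builds each array by prefix decisions (1-branch before 0-branch) recursing on the remaining
-- counts, instead of A's choice of index sets via combinations; same cost, alternative algorithm.


-- ===== PORT A =====
-- itertools.combinations(l, k) in lexicographic order (hand-rolled helper; exact for the
-- duplicate-free lists A feeds it).  The 'k > length' early exit is itertools' own
-- 'if r > n: return' guard
def pvCombos : List Int → Nat → List (List Int)
  | _, 0 => [[]]
  | [], _ + 1 => []
  | x :: xs, k + 1 =>
    if xs.length + 1 < k + 1 then []
    else (pvCombos xs k).map (x :: ·) ++ pvCombos xs (k + 1)

def unique_binary_perms (ones : Int) (zeros : Int) : List (List Int) :=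
  let n := ones + zeros
  -- for each combination: arr = [0]*n; for i in ones_positions: arr[i] = 1  (indices are in
  -- range inside Pre_, so List.set on i.toNat is exact); result.append(arr) = map
  (pvCombos (PySem.List.pyRange 0 n 1) ones.toNat).map
    (fun pos => pos.foldl (fun arr i => arr.set i.toNat 1) (List.replicate n.toNat 0))

-- ===== PORT B =====
-- the explicit stack, top at the head (Python appends/pops at the list's end); the 0-branch is
-- pushed before the 1-branch, so the 1-branch is popped first.  Python's shared prefix chain
-- (bit, parent) with newest bit first IS a cons list here (None = []), and its
-- walk-then-reverse materialisation is List.reverse.  fuel only makes the loop structural: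
-- it bounds the number of pops, and exceeds it on Pre_
def pvGo : Nat → List (Int × Int × List Int) → List (List Int) → List (List Int)
  | 0, _, acc => acc
  | _ + 1, [], acc => acc
  | fuel + 1, (o, z, pre) :: rest, acc =>
    if o = 0 ∧ z = 0 then pvGo fuel rest (acc ++ [pre.reverse])
    else
      pvGo fuel ((if 0 < o then [(o - 1, z, 1 :: pre)] else []) ++
                 (if 0 < z then [(o, z - 1, 0 :: pre)] else []) ++ rest) acc

def unique_binary_perms_alt (ones : Int) (zeros : Int) : List (List Int) :=
  pvGo (2 ^ ((ones + zeros).toNat + 1)) [(ones, zeros, [])] []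

-- ===== PRECONDITION & SPEC =====
-- Pre_ excludes ones < 0, where A raises ValueError (combinations rejects negative r), and the
-- corner ones = 0 ∧ zeros < 0, where A's value [[]] is an accident of [0]*n being [] for
-- negative n (a meaningless input no caller would specify; B returns [] there).
def Pre_unique_binary_perms (ones : Int) (zeros : Int) : Prop :=
  0 ≤ ones ∧ (0 ≤ zeros ∨ 0 < ones)
instance (ones : Int) (zeros : Int) : Decidable (Pre_unique_binary_perms ones zeros) := by
  unfold Pre_unique_binary_perms; infer_instance
def pvWitness_unique_binary_perms : Int × Int := (2, 1)

def Spec_unique_binary_perms (ones : Int) (zeros : Int) (out : List (List Int)) : Prop :=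
  out = unique_binary_perms_alt ones zeros
instance (ones : Int) (zeros : Int) (out : List (List Int)) : Decidable (Spec_unique_binary_perms ones zeros out) := by
  unfold Spec_unique_binary_perms; infer_instance

-- ===== CLAIM (what is proved, stated in full; the proofs are below) =====
def Claim_equal_unique_binary_perms : Prop := ∀ (ones : Int) (zeros : Int), Dom_unique_binary_perms ones zeros → Pre_unique_binary_perms ones zeros → Spec_unique_binary_perms ones zeros (unique_binary_perms ones zeros)

-- ===== LEMMAS AND PROOFS =====

-- canonical recursion both sides are reduced to: all 0/1-lists with o ones and z zeros,
-- in A's (= lexicographic-positions = 1-before-0) order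
def Espec : Nat → Nat → List (List Int)
  | 0, 0 => [[]]
  | o + 1, 0 => (Espec o 0).map (1 :: ·)
  | 0, z + 1 => (Espec 0 z).map (0 :: ·)
  | o + 1, z + 1 => (Espec o (z + 1)).map (1 :: ·) ++ (Espec (o + 1) z).map (0 :: ·)

theorem Espec_unfold (o z : Nat) (h : o + z ≠ 0) :
    Espec o z = (if 0 < o then (Espec (o - 1) z).map (1 :: ·) else []) ++
                (if 0 < z then (Espec o (z - 1)).map (0 :: ·) else []) := by
  match o, z with
  | 0, 0 => omega
  | o + 1, 0 => simp [Espec]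
  | 0, z + 1 => simp [Espec]
  | o + 1, z + 1 => simp [Espec]

theorem Espec_zero (z : Nat) : Espec 0 z = [List.replicate z 0] := by
  induction z with
  | zero => simp [Espec]
  | succ z ih => simp [Espec, ih, List.replicate_succ]

theorem pvCombos_subset : ∀ (l : List Int) (k : Nat) (c : List Int), c ∈ pvCombos l k →
    ∀ x ∈ c, x ∈ l := by
  intro l
  induction l with
  | nil =>
    intro k c hc x hx
    cases k
    · simp [pvCombos] at hc; simp [hc] at hx
    · simp [pvCombos] at hc
  | cons y ys ih =>
    intro k c hc x hx
    cases k with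
    | zero => simp [pvCombos] at hc; simp [hc] at hx
    | succ k =>
      simp only [pvCombos] at hc
      split at hc
      · simp at hc
      simp only [List.mem_append, List.mem_map] at hc
      rcases hc with ⟨c', hc', rfl⟩ | hc
      · rcases List.mem_cons.1 hx with rfl | hx
        · exact List.mem_cons_self
        · exact List.mem_cons_of_mem _ (ih k c' hc' x hx)
      · exact List.mem_cons_of_mem _ (ih (k + 1) c hc x hx)

theorem pvCombos_nil_of_lt : ∀ (l : List Int) (k : Nat), l.length < k → pvCombos l k = [] := by
  intro l
  induction l with
  | nil =>
    intro k hk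
    match k, hk with
    | n + 1, _ => simp [pvCombos]
  | cons y ys ih =>
    intro k hk
    match k, hk with
    | n + 1, hk =>
      simp only [List.length_cons] at hk
      simp only [pvCombos]
      rw [if_pos (by omega)]

theorem combos_ind (l : List Int) : ∀ k, l.Nodup → k ≤ l.length →
    (pvCombos l k).map (fun c => l.map (fun i => if i ∈ c then (1 : Int) else 0)) =
      Espec k (l.length - k) := by
  induction l with
  | nil =>
    intro k _ hk
    have : k = 0 := by simp at hk; omega
    subst this
    simp [pvCombos, Espec]
  | cons x xs ih =>
    intro k hnd hk
    rcases List.nodup_cons.1 hnd with ⟨hx, hnd'⟩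
    cases k with
    | zero =>
      simp only [pvCombos, Espec_zero, Nat.sub_zero, List.length_cons, List.map_cons,
        List.map_const', List.not_mem_nil, if_neg (fun h => h), List.length_cons]
      simp [List.replicate_succ]
    | succ k =>
      have hk' : k ≤ xs.length := by simpa using hk
      simp only [pvCombos]
      rw [if_neg (by simp only [List.length_cons] at hk; omega)]
      simp only [List.map_append, List.map_map]
      have h1 : (pvCombos xs k).map
            ((fun c => (x :: xs).map (fun i => if i ∈ c then (1 : Int) else 0)) ∘ (x :: ·)) =
          ((pvCombos xs k).map (fun c => xs.map (fun i => if i ∈ c then (1 : Int) else 0))).map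
            (1 :: ·) := by
        rw [List.map_map]
        apply List.map_congr_left
        intro c _
        show (x :: xs).map (fun i => if i ∈ x :: c then (1 : Int) else 0) =
          1 :: xs.map (fun i => if i ∈ c then (1 : Int) else 0)
        rw [List.map_cons, if_pos List.mem_cons_self]
        congr 1
        apply List.map_congr_left
        intro i hi
        have hne : i ≠ x := fun h => hx (h ▸ hi)
        simp [List.mem_cons, hne]
      have h2 : (pvCombos xs (k + 1)).map
            (fun c => (x :: xs).map (fun i => if i ∈ c then (1 : Int) else 0)) =
          ((pvCombos xs (k + 1)).map
            (fun c => xs.map (fun i => if i ∈ c then (1 : Int) else 0))).map (0 :: ·) := by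
        rw [List.map_map]
        apply List.map_congr_left
        intro c hc
        have hxc : x ∉ c := fun h => hx (pvCombos_subset xs (k + 1) c hc x h)
        simp [Function.comp_apply, List.map_cons, hxc]
      rw [h1, h2, ih k hnd' hk']
      rcases Nat.lt_or_ge k xs.length with hlt | hge
      · -- k + 1 ≤ xs.length : both parts present
        rw [ih (k + 1) hnd' hlt]
        have hz : (x :: xs).length - (k + 1) = (xs.length - (k + 1)) + 1 := by
          simp only [List.length_cons]; omega
        have hz2 : xs.length - k = (xs.length - (k + 1)) + 1 := by omega
        rw [hz, hz2, Espec]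
      · -- k = xs.length : second part empty
        have hkeq : k = xs.length := by omega
        rw [pvCombos_nil_of_lt xs (k + 1) (by omega)]
        have hz : (x :: xs).length - (k + 1) = 0 := by simp [List.length_cons]; omega
        have hz2 : xs.length - k = 0 := by omega
        rw [hz, hz2, Espec]
        simp

theorem getD_set (a : List Int) (k j : Nat) (v : Int) (hj : j < a.length) :
    (a.set k v).getD j 0 = if k = j then v else a.getD j 0 := by
  rw [List.getD_eq_getElem?_getD, List.getD_eq_getElem?_getD, List.getElem?_set]
  by_cases h : k = j <;> simp [h, hj]

theorem foldl_set_ind : ∀ (c : List Int) (a : List Int),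
    (∀ i ∈ c, 0 ≤ i ∧ i.toNat < a.length) →
    c.foldl (fun arr i => arr.set i.toNat 1) a =
      (List.range a.length).map (fun j : Nat => if (j : Int) ∈ c then 1 else a.getD j 0) := by
  intro c
  induction c with
  | nil =>
    intro a _
    simp only [List.foldl_nil, List.not_mem_nil, if_false]
    apply List.ext_getElem
    · simp
    · intro i h1 h2
      simp [List.getD_eq_getElem?_getD, List.getElem?_eq_getElem h1]
  | cons x c ih =>
    intro a hb
    have hx := hb x List.mem_cons_self
    have hlen : (a.set x.toNat 1).length = a.length := by simp
    rw [List.foldl_cons, ih (a.set x.toNat 1) (by intro i hi; rw [hlen]; exact hb i (List.mem_cons_of_mem _ hi)), hlen]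
    apply List.map_congr_left
    intro j hj
    have hjl : j < a.length := List.mem_range.1 hj
    by_cases hc : (j : Int) ∈ c
    · simp [hc]
    · rw [getD_set a x.toNat j 1 hjl]
      by_cases he : x.toNat = j
      · have hxe : (j : Int) ∈ x :: c := List.mem_cons.2 (Or.inl (by omega))
        simp [hc, he, hxe]
      · have hxe : (j : Int) ∉ x :: c := by
          intro h
          rcases List.mem_cons.1 h with h | h
          · exact he (by omega)
          · exact hc h
        simp [hc, hxe, he]

-- what one stack entry contributes to the final result
def pvEntry (e : Int × Int × List Int) : List (List Int) :=
  (Espec e.1.toNat e.2.1.toNat).map (e.2.2.reverse ++ ·)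

-- fuel needed to exhaust one entry's subtree
def pvCost (e : Int × Int × List Int) : Nat := 2 ^ (e.1.toNat + e.2.1.toNat + 1) - 1

theorem pvEntry_split (o z : Int) (pre : List Int) (h0 : ¬ (o = 0 ∧ z = 0))
    (ho : 0 ≤ o) (hz : 0 ≤ z) :
    pvEntry (o, z, pre) =
      (if 0 < o then pvEntry (o - 1, z, 1 :: pre) else []) ++
      (if 0 < z then pvEntry (o, z - 1, 0 :: pre) else []) := by
  unfold pvEntry
  simp only
  rw [Espec_unfold o.toNat z.toNat (by omega), List.map_append]
  congr 1
  · by_cases hop : 0 < o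
    · rw [if_pos hop, if_pos (by omega : 0 < o.toNat), List.map_map,
        show (o - 1).toNat = o.toNat - 1 from by omega]
      apply List.map_congr_left
      intro c _
      simp
    · rw [if_neg hop, if_neg (by omega : ¬ 0 < o.toNat)]
      simp
  · by_cases hzp : 0 < z
    · rw [if_pos hzp, if_pos (by omega : 0 < z.toNat), List.map_map,
        show (z - 1).toNat = z.toNat - 1 from by omega]
      apply List.map_congr_left
      intro c _
      simp
    · rw [if_neg hzp, if_neg (by omega : ¬ 0 < z.toNat)]
      simp

theorem pvGo_spec : ∀ (fuel : Nat) (st : List (Int × Int × List Int)) (acc : List (List Int)),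
    (∀ e ∈ st, 0 ≤ e.1 ∧ 0 ≤ e.2.1) → (st.map pvCost).sum ≤ fuel →
    pvGo fuel st acc = acc ++ st.flatMap pvEntry := by
  intro fuel
  induction fuel with
  | zero =>
    intro st acc _ hf
    match st with
    | [] => simp [pvGo]
    | e :: rest =>
      exfalso
      have h1 : 1 ≤ pvCost e := by
        unfold pvCost
        have : 2 ≤ 2 ^ (e.1.toNat + e.2.1.toNat + 1) := by
          calc 2 = 2 ^ 1 := rfl
          _ ≤ 2 ^ (e.1.toNat + e.2.1.toNat + 1) := Nat.pow_le_pow_right (by omega) (by omega)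
        omega
      simp only [List.map_cons, List.sum_cons] at hf
      omega
  | succ fuel ih =>
    intro st acc hnn hf
    match st with
    | [] => simp [pvGo]
    | (o, z, pre) :: rest =>
      have hoz := hnn (o, z, pre) List.mem_cons_self
      simp only at hoz
      have hrest : ∀ e ∈ rest, 0 ≤ e.1 ∧ 0 ≤ e.2.1 :=
        fun e he => hnn e (List.mem_cons_of_mem _ he)
      simp only [List.map_cons, List.sum_cons] at hf
      have hpow : pvCost (o, z, pre) = 2 * 2 ^ (o.toNat + z.toNat) - 1 := by
        unfold pvCost
        simp [Nat.pow_succ, Nat.mul_comm]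
      have hone : 1 ≤ 2 ^ (o.toNat + z.toNat) := Nat.one_le_two_pow
      by_cases h0 : o = 0 ∧ z = 0
      · rcases h0 with ⟨rfl, rfl⟩
        rw [show pvGo (fuel + 1) ((0, 0, pre) :: rest) acc = pvGo fuel rest (acc ++ [pre.reverse]) from by
          simp [pvGo]]
        rw [ih rest (acc ++ [pre.reverse]) hrest (by rw [hpow] at hf; simp at hf; omega)]
        simp [pvEntry, Espec]
      · have hcost1 : 0 < o → pvCost (o - 1, z, 1 :: pre) = 2 ^ (o.toNat + z.toNat) - 1 := by
          intro hop; unfold pvCost; simp only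
          have : (o - 1).toNat + z.toNat + 1 = o.toNat + z.toNat := by omega
          rw [this]
        have hcost0 : 0 < z → pvCost (o, z - 1, 0 :: pre) = 2 ^ (o.toNat + z.toNat) - 1 := by
          intro hzp; unfold pvCost; simp only
          have : o.toNat + (z - 1).toNat + 1 = o.toNat + z.toNat := by omega
          rw [this]
        have hsplit := pvEntry_split o z pre h0 hoz.1 hoz.2
        rw [show pvGo (fuel + 1) ((o, z, pre) :: rest) acc =
            pvGo fuel ((if 0 < o then [(o - 1, z, 1 :: pre)] else []) ++
              (if 0 < z then [(o, z - 1, 0 :: pre)] else []) ++ rest) acc from by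
          simp [pvGo, h0]]
        by_cases hop : 0 < o <;> by_cases hzp : 0 < z
        · rw [if_pos hop, if_pos hzp] at hsplit ⊢
          simp only [List.cons_append, List.nil_append]
          rw [ih ((o - 1, z, 1 :: pre) :: (o, z - 1, 0 :: pre) :: rest) acc
            (by
              intro e he
              rcases List.mem_cons.1 he with rfl | he
              · exact ⟨by omega, by simp only; omega⟩
              rcases List.mem_cons.1 he with rfl | he
              · exact ⟨by omega, by simp only; omega⟩
              · exact hrest e he)
            (by
              simp only [List.map_cons, List.sum_cons]
              rw [hcost1 hop, hcost0 hzp]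
              rw [hpow] at hf
              omega)]
          simp [hsplit, List.flatMap_cons]
        · rw [if_pos hop, if_neg hzp] at hsplit ⊢
          simp only [List.cons_append, List.nil_append]
          rw [ih ((o - 1, z, 1 :: pre) :: rest) acc
            (by
              intro e he
              rcases List.mem_cons.1 he with rfl | he
              · exact ⟨by omega, by simp only; omega⟩
              · exact hrest e he)
            (by
              simp only [List.map_cons, List.sum_cons]
              rw [hcost1 hop]
              rw [hpow] at hf
              omega)]
          simp [hsplit, List.flatMap_cons]
        · rw [if_neg hop, if_pos hzp] at hsplit ⊢
          simp only [List.cons_append, List.nil_append]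
          rw [ih ((o, z - 1, 0 :: pre) :: rest) acc
            (by
              intro e he
              rcases List.mem_cons.1 he with rfl | he
              · exact ⟨by omega, by simp only; omega⟩
              · exact hrest e he)
            (by
              simp only [List.map_cons, List.sum_cons]
              rw [hcost0 hzp]
              rw [hpow] at hf
              omega)]
          simp [hsplit, List.flatMap_cons]
        · exact absurd ⟨by omega, by omega⟩ h0

-- a stack whose every entry still owes a negative number of zeros never reaches the base
-- case, so the loop only drains the stack and returns the accumulator
theorem pvGo_neg (fuel : Nat) : ∀ (st : List (Int × Int × List Int)) (acc : List (List Int)),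
    (∀ e ∈ st, e.2.1 < 0) → pvGo fuel st acc = acc := by
  induction fuel with
  | zero => intro st acc _; cases st <;> rfl
  | succ fuel ih =>
    intro st acc hneg
    match st with
    | [] => rfl
    | (o, z, pre) :: rest =>
      have hz := hneg (o, z, pre) List.mem_cons_self
      simp only at hz
      rw [show pvGo (fuel + 1) ((o, z, pre) :: rest) acc =
          pvGo fuel ((if 0 < o then [(o - 1, z, 1 :: pre)] else []) ++
            (if 0 < z then [(o, z - 1, 0 :: pre)] else []) ++ rest) acc from by
        simp [pvGo, show ¬ (o = 0 ∧ z = 0) from by omega]]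
      rw [if_neg (by omega : ¬ 0 < z)]
      apply ih
      intro e he
      simp only [List.mem_append] at he
      rcases he with he | he
      · split at he <;> simp_all
      · exact hneg e (List.mem_cons_of_mem _ he)

theorem unique_binary_perms_eq_of_nonneg (ones zeros : Int) (ho : 0 ≤ ones) (hz : 0 ≤ zeros) :
    unique_binary_perms ones zeros = unique_binary_perms_alt ones zeros := by
  unfold unique_binary_perms unique_binary_perms_alt
  set n : Int := ones + zeros with hn
  have hn0 : 0 ≤ n := by omega
  set l : List Int := PySem.List.pyRange 0 n 1 with hl
  have hlen : l.length = n.toNat := by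
    rw [hl, PySem.List.length_pyRange_one]; congr 1; omega
  have hnd : l.Nodup := PySem.List.nodup_pyRange_one 0 n
  -- fill = indicator
  have hfill : (pvCombos l ones.toNat).map
        (fun pos => pos.foldl (fun arr i => arr.set i.toNat 1) (List.replicate n.toNat 0)) =
      (pvCombos l ones.toNat).map (fun c => l.map (fun i => if i ∈ c then (1 : Int) else 0)) := by
    apply List.map_congr_left
    intro c hc
    have hbnd : ∀ i ∈ c, 0 ≤ i ∧ i.toNat < (List.replicate n.toNat (0 : Int)).length := by
      intro i hi
      have := pvCombos_subset l ones.toNat c hc i hi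
      rw [hl, PySem.List.mem_pyRange_one] at this
      constructor
      · exact this.1
      · rw [List.length_replicate]; omega
    rw [foldl_set_ind c _ hbnd]
    rw [List.length_replicate]
    have : l.map (fun i => if i ∈ c then (1 : Int) else 0) =
        (List.range n.toNat).map (fun j : Nat => if ((j : Int)) ∈ c then (1 : Int) else 0) := by
      rw [hl, PySem.List.pyRange_one, List.map_map]
      have : (n - 0).toNat = n.toNat := by omega
      rw [this]
      apply List.map_congr_left
      intro j _
      simp
    rw [this]
    apply List.map_congr_left
    intro j hj
    have : (List.replicate n.toNat (0 : Int)).getD j 0 = 0 := by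
      simp only [List.getD_eq_getElem?_getD, List.getElem?_replicate]
      split <;> rfl
    rw [this]
  rw [hfill, combos_ind l ones.toNat hnd (by rw [hlen]; omega), hlen]
  have harg : n.toNat - ones.toNat = zeros.toNat := by omega
  rw [harg, pvGo_spec (2 ^ ((ones + zeros).toNat + 1)) [(ones, zeros, [])] []
    (by intro e he; simp at he; simp [he, ho, hz])
    (by
      simp only [List.map_cons, List.map_nil, List.sum_cons, List.sum_nil]
      unfold pvCost
      simp only
      rw [show (ones + zeros).toNat = ones.toNat + zeros.toNat from by omega, Nat.pow_succ]
      have h1 : 1 ≤ 2 ^ (ones.toNat + zeros.toNat) := Nat.one_le_two_pow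
      omega)]
  simp [pvEntry]

theorem unique_binary_perms_spec : Claim_equal_unique_binary_perms := by
  intro ones zeros _ hpre
  rcases hpre with ⟨ho, hzo⟩
  unfold Spec_unique_binary_perms
  by_cases hz : 0 ≤ zeros
  · exact unique_binary_perms_eq_of_nonneg ones zeros ho hz
  · have hop : 0 < ones := by rcases hzo with h | h; omega; exact h
    -- zeros < 0: A's combinations of a too-short range is empty; B's stack drains to []
    unfold unique_binary_perms unique_binary_perms_alt
    simp only
    rw [pvCombos_nil_of_lt (PySem.List.pyRange 0 (ones + zeros) 1) ones.toNat (by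
      rw [PySem.List.length_pyRange_one]
      omega)]
    rw [pvGo_neg]
    · rfl
    · intro e he
      simp only [List.mem_singleton] at he
      subst he
      simp only
      omega
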